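-- pv_equiv track=rewrite | github.com/wbelka/llm_instaler | llm_installer/detectors_v2/timm_detector.py | _infer_architecture
-- ===== SOURCE A (Python) =====
-- def _infer_architecture(model_id: str) -> str:
--     """Infer architecture from model ID"""
--     model_lower = model_id.lower()
--
--     # Vision Transformer variants
--     if 'vit' in model_lower:
--         if 'tiny' in model_lower:
--             return 'ViT-Tiny'
--         elif 'small' in model_lower:
--             return 'ViT-Small'
--         elif 'base' in model_lower:
--             return 'ViT-Base'
--         elif 'large' in model_lower:
--             return 'ViT-Large'
--         elif 'huge' in model_lower:
--             return 'ViT-Huge'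
--         else:
--             return 'ViT'
--
--     # ResNet variants
--     elif 'resnet' in model_lower:
--         for size in ['18', '34', '50', '101', '152']:
--             if size in model_lower:
--                 return f'ResNet{size}'
--         return 'ResNet'
--
--     # EfficientNet variants
--     elif 'efficientnet' in model_lower:
--         for variant in ['b0', 'b1', 'b2', 'b3', 'b4', 'b5', 'b6', 'b7']:
--             if variant in model_lower:
--                 return f'EfficientNet-{variant.upper()}'
--         return 'EfficientNet'
--
--     # ConvNeXt variants
--     elif 'convnext' in model_lower:
--         if 'tiny' in model_lower:
--             return 'ConvNeXt-Tiny'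
--         elif 'small' in model_lower:
--             return 'ConvNeXt-Small'
--         elif 'base' in model_lower:
--             return 'ConvNeXt-Base'
--         elif 'large' in model_lower:
--             return 'ConvNeXt-Large'
--         else:
--             return 'ConvNeXt'
--
--     # Swin Transformer
--     elif 'swin' in model_lower:
--         return 'Swin-Transformer'
--
--     return 'Vision-Model'
-- ===== SOURCE B (Python) =====
-- # Flat rule base: each rule is (set of required substrings, name), in priority
-- # order obtained by flattening A's nested ladder into conjunctions.
-- _RULES = [
--     ({'vit', 'tiny'}, 'ViT-Tiny'), ({'vit', 'small'}, 'ViT-Small'),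
--     ({'vit', 'base'}, 'ViT-Base'), ({'vit', 'large'}, 'ViT-Large'),
--     ({'vit', 'huge'}, 'ViT-Huge'), ({'vit'}, 'ViT'),
--     ({'resnet', '18'}, 'ResNet18'), ({'resnet', '34'}, 'ResNet34'),
--     ({'resnet', '50'}, 'ResNet50'), ({'resnet', '101'}, 'ResNet101'),
--     ({'resnet', '152'}, 'ResNet152'), ({'resnet'}, 'ResNet'),
--     ({'efficientnet', 'b0'}, 'EfficientNet-B0'), ({'efficientnet', 'b1'}, 'EfficientNet-B1'),
--     ({'efficientnet', 'b2'}, 'EfficientNet-B2'), ({'efficientnet', 'b3'}, 'EfficientNet-B3'),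
--     ({'efficientnet', 'b4'}, 'EfficientNet-B4'), ({'efficientnet', 'b5'}, 'EfficientNet-B5'),
--     ({'efficientnet', 'b6'}, 'EfficientNet-B6'), ({'efficientnet', 'b7'}, 'EfficientNet-B7'),
--     ({'efficientnet'}, 'EfficientNet'),
--     ({'convnext', 'tiny'}, 'ConvNeXt-Tiny'), ({'convnext', 'small'}, 'ConvNeXt-Small'),
--     ({'convnext', 'base'}, 'ConvNeXt-Base'), ({'convnext', 'large'}, 'ConvNeXt-Large'),
--     ({'convnext'}, 'ConvNeXt'),
--     ({'swin'}, 'Swin-Transformer'),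
-- ]
--
--
-- def _infer_architecture(model_id: str) -> str:
--     """Infer architecture from model ID (flat rule base, all matches collected)."""
--     model_lower = model_id.lower()
--     matched = [name for conds, name in _RULES
--                if all(c in model_lower for c in conds)]
--     return matched[0] if matched else 'Vision-Model'
-- ===== Notes on version B (the rewrite author's own statement) =====
-- stated objective: simpler
-- what changed: A's nested if/elif ladder with two inline per-family loops is flattened into one declarative priority list of (required-substring-set, name) rules; B collects every rule whose substrings all occur and returns the head of that list, with no nesting or per-family control flow.
import Mathlib
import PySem

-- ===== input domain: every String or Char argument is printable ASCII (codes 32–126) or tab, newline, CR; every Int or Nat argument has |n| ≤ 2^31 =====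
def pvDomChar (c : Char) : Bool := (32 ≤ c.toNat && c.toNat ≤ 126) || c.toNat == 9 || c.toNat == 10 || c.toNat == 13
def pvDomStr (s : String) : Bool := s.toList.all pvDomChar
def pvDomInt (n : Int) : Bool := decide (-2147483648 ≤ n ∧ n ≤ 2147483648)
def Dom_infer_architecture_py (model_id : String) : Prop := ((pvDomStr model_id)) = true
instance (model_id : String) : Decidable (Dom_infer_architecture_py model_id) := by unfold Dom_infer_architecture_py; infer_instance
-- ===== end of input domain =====

-- B replaces A's nested if/elif ladder (with two inline loops) by a flat declarative
-- rule base of (required-substrings, name) pairs: collect every matching rule, return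
-- the first; objective: simpler.

-- ===== PORT A =====
-- A's 'for size in [...]' loop over ResNet sizes, step for step (f'ResNet{size}')
def pvResNetLoop (ml : String) : List String → String
  | [] => "ResNet"
  | size :: rest => if PySem.Str.isIn size ml then "ResNet" ++ size else pvResNetLoop ml rest

-- A's 'for variant in [...]' loop over EfficientNet variants (f'EfficientNet-{variant.upper()}')
def pvEffNetLoop (ml : String) : List String → String
  | [] => "EfficientNet"
  | v :: rest => if PySem.Str.isIn v ml then "EfficientNet-" ++ PySem.Str.upper v else pvEffNetLoop ml rest

def infer_architecture_py (model_id : String) : String :=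
  let ml := PySem.Str.lower model_id
  if PySem.Str.isIn "vit" ml then
    if PySem.Str.isIn "tiny" ml then "ViT-Tiny"
    else if PySem.Str.isIn "small" ml then "ViT-Small"
    else if PySem.Str.isIn "base" ml then "ViT-Base"
    else if PySem.Str.isIn "large" ml then "ViT-Large"
    else if PySem.Str.isIn "huge" ml then "ViT-Huge"
    else "ViT"
  else if PySem.Str.isIn "resnet" ml then
    pvResNetLoop ml ["18", "34", "50", "101", "152"]
  else if PySem.Str.isIn "efficientnet" ml then
    pvEffNetLoop ml ["b0", "b1", "b2", "b3", "b4", "b5", "b6", "b7"]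
  else if PySem.Str.isIn "convnext" ml then
    if PySem.Str.isIn "tiny" ml then "ConvNeXt-Tiny"
    else if PySem.Str.isIn "small" ml then "ConvNeXt-Small"
    else if PySem.Str.isIn "base" ml then "ConvNeXt-Base"
    else if PySem.Str.isIn "large" ml then "ConvNeXt-Large"
    else "ConvNeXt"
  else if PySem.Str.isIn "swin" ml then "Swin-Transformer"
  else "Vision-Model"

-- ===== PORT B =====
-- B's flat priority rule base: (required substrings, name)
def pvRules : List (List String × String) :=
  [(["vit", "tiny"], "ViT-Tiny"),
   (["vit", "small"], "ViT-Small"),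
   (["vit", "base"], "ViT-Base"),
   (["vit", "large"], "ViT-Large"),
   (["vit", "huge"], "ViT-Huge"),
   (["vit"], "ViT"),
   (["resnet", "18"], "ResNet18"),
   (["resnet", "34"], "ResNet34"),
   (["resnet", "50"], "ResNet50"),
   (["resnet", "101"], "ResNet101"),
   (["resnet", "152"], "ResNet152"),
   (["resnet"], "ResNet"),
   (["efficientnet", "b0"], "EfficientNet-B0"),
   (["efficientnet", "b1"], "EfficientNet-B1"),
   (["efficientnet", "b2"], "EfficientNet-B2"),
   (["efficientnet", "b3"], "EfficientNet-B3"),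
   (["efficientnet", "b4"], "EfficientNet-B4"),
   (["efficientnet", "b5"], "EfficientNet-B5"),
   (["efficientnet", "b6"], "EfficientNet-B6"),
   (["efficientnet", "b7"], "EfficientNet-B7"),
   (["efficientnet"], "EfficientNet"),
   (["convnext", "tiny"], "ConvNeXt-Tiny"),
   (["convnext", "small"], "ConvNeXt-Small"),
   (["convnext", "base"], "ConvNeXt-Base"),
   (["convnext", "large"], "ConvNeXt-Large"),
   (["convnext"], "ConvNeXt"),
   (["swin"], "Swin-Transformer")]

def infer_architecture_py_alt (model_id : String) : String :=
  let ml := PySem.Str.lower model_id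
  let matched := (pvRules.filter (fun r => r.1.all (fun c => PySem.Str.isIn c ml))).map Prod.snd
  matched.headD "Vision-Model"

-- ===== PRECONDITION & SPEC =====
def Spec_infer_architecture_py (model_id : String) (out : String) : Prop := out = infer_architecture_py_alt model_id
instance (model_id : String) (out : String) : Decidable (Spec_infer_architecture_py model_id out) := by unfold Spec_infer_architecture_py; infer_instance

-- ===== CLAIM =====
def Claim_equal_infer_architecture_py : Prop := ∀ (model_id : String), Dom_infer_architecture_py model_id → Spec_infer_architecture_py model_id (infer_architecture_py model_id)

-- ===== LEMMAS AND PROOFS =====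
-- (the verdict proof proceeds by exhaustive case analysis on the substring tests)

-- ===== VERDICT =====
theorem infer_architecture_py_spec : Claim_equal_infer_architecture_py := by
  intro model_id _
  show infer_architecture_py model_id = infer_architecture_py_alt model_id
  cases h0 : PySem.Str.isIn "vit" (PySem.Str.lower model_id) with
  | true =>
    cases h1 : PySem.Str.isIn "tiny" (PySem.Str.lower model_id) with
    | true =>
      simp_all [infer_architecture_py, infer_architecture_py_alt, pvRules]
    | false =>
      cases h2 : PySem.Str.isIn "small" (PySem.Str.lower model_id) with
      | true =>
        simp_all [infer_architecture_py, infer_architecture_py_alt, pvRules]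
      | false =>
        cases h3 : PySem.Str.isIn "base" (PySem.Str.lower model_id) with
        | true =>
          simp_all [infer_architecture_py, infer_architecture_py_alt, pvRules]
        | false =>
          cases h4 : PySem.Str.isIn "large" (PySem.Str.lower model_id) with
          | true =>
            simp_all [infer_architecture_py, infer_architecture_py_alt, pvRules]
          | false =>
            cases h5 : PySem.Str.isIn "huge" (PySem.Str.lower model_id) with
            | true =>
              simp_all [infer_architecture_py, infer_architecture_py_alt, pvRules]
            | false =>
              simp_all [infer_architecture_py, infer_architecture_py_alt, pvRules]
  | false =>
    cases h6 : PySem.Str.isIn "resnet" (PySem.Str.lower model_id) with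
    | true =>
      cases h7 : PySem.Str.isIn "18" (PySem.Str.lower model_id) with
      | true =>
        simp_all [infer_architecture_py, infer_architecture_py_alt, pvRules, pvResNetLoop]
      | false =>
        cases h8 : PySem.Str.isIn "34" (PySem.Str.lower model_id) with
        | true =>
          simp_all [infer_architecture_py, infer_architecture_py_alt, pvRules, pvResNetLoop]
        | false =>
          cases h9 : PySem.Str.isIn "50" (PySem.Str.lower model_id) with
          | true =>
            simp_all [infer_architecture_py, infer_architecture_py_alt, pvRules, pvResNetLoop]
          | false =>
            cases h10 : PySem.Str.isIn "101" (PySem.Str.lower model_id) with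
            | true =>
              simp_all [infer_architecture_py, infer_architecture_py_alt, pvRules, pvResNetLoop]
            | false =>
              cases h11 : PySem.Str.isIn "152" (PySem.Str.lower model_id) with
              | true =>
                simp_all [infer_architecture_py, infer_architecture_py_alt, pvRules, pvResNetLoop]
              | false =>
                simp_all [infer_architecture_py, infer_architecture_py_alt, pvRules, pvResNetLoop]
    | false =>
      cases h12 : PySem.Str.isIn "efficientnet" (PySem.Str.lower model_id) with
      | true =>
        cases h13 : PySem.Str.isIn "b0" (PySem.Str.lower model_id) with
        | true =>
          simp_all [infer_architecture_py, infer_architecture_py_alt, pvRules, pvEffNetLoop]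
          all_goals decide
        | false =>
          cases h14 : PySem.Str.isIn "b1" (PySem.Str.lower model_id) with
          | true =>
            simp_all [infer_architecture_py, infer_architecture_py_alt, pvRules, pvEffNetLoop]
            all_goals decide
          | false =>
            cases h15 : PySem.Str.isIn "b2" (PySem.Str.lower model_id) with
            | true =>
              simp_all [infer_architecture_py, infer_architecture_py_alt, pvRules, pvEffNetLoop]
              all_goals decide
            | false =>
              cases h16 : PySem.Str.isIn "b3" (PySem.Str.lower model_id) with
              | true =>
                simp_all [infer_architecture_py, infer_architecture_py_alt, pvRules, pvEffNetLoop]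
                all_goals decide
              | false =>
                cases h17 : PySem.Str.isIn "b4" (PySem.Str.lower model_id) with
                | true =>
                  simp_all [infer_architecture_py, infer_architecture_py_alt, pvRules, pvEffNetLoop]
                  all_goals decide
                | false =>
                  cases h18 : PySem.Str.isIn "b5" (PySem.Str.lower model_id) with
                  | true =>
                    simp_all [infer_architecture_py, infer_architecture_py_alt, pvRules, pvEffNetLoop]
                    all_goals decide
                  | false =>
                    cases h19 : PySem.Str.isIn "b6" (PySem.Str.lower model_id) with
                    | true =>
                      simp_all [infer_architecture_py, infer_architecture_py_alt, pvRules, pvEffNetLoop]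
                      all_goals decide
                    | false =>
                      cases h20 : PySem.Str.isIn "b7" (PySem.Str.lower model_id) with
                      | true =>
                        simp_all [infer_architecture_py, infer_architecture_py_alt, pvRules, pvEffNetLoop]
                        all_goals decide
                      | false =>
                        simp_all [infer_architecture_py, infer_architecture_py_alt, pvRules, pvEffNetLoop]
      | false =>
        cases h21 : PySem.Str.isIn "convnext" (PySem.Str.lower model_id) with
        | true =>
          cases h22 : PySem.Str.isIn "tiny" (PySem.Str.lower model_id) with
          | true =>
            simp_all [infer_architecture_py, infer_architecture_py_alt, pvRules]
          | false =>
            cases h23 : PySem.Str.isIn "small" (PySem.Str.lower model_id) with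
            | true =>
              simp_all [infer_architecture_py, infer_architecture_py_alt, pvRules]
            | false =>
              cases h24 : PySem.Str.isIn "base" (PySem.Str.lower model_id) with
              | true =>
                simp_all [infer_architecture_py, infer_architecture_py_alt, pvRules]
              | false =>
                cases h25 : PySem.Str.isIn "large" (PySem.Str.lower model_id) with
                | true =>
                  simp_all [infer_architecture_py, infer_architecture_py_alt, pvRules]
                | false =>
                  simp_all [infer_architecture_py, infer_architecture_py_alt, pvRules]
        | false =>
          cases h26 : PySem.Str.isIn "swin" (PySem.Str.lower model_id) with
          | true =>
            simp_all [infer_architecture_py, infer_architecture_py_alt, pvRules]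
          | false =>
            simp_all [infer_architecture_py, infer_architecture_py_alt, pvRules]
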